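-- pv_equiv track=rewrite | github.com/json420/novacut | novacut/thumbnail.py | walk_forward
-- ===== SOURCE A (Python) =====
-- def walk_forward(existing, frame, file_stop, steps=1):
--     assert 0 <= frame < file_stop
--     assert frame not in existing
--     assert steps >= 1
--     for i in range(steps):
--         frame += 1
--         if frame >= file_stop or frame in existing:
--             return frame - 1
--     return frame
-- ===== SOURCE B (Python) =====
-- def walk_forward(existing, frame, file_stop, steps=1):
--     assert 0 <= frame < file_stop
--     assert frame not in existing
--     assert steps >= 1
--     block = file_stop
--     for e in existing:
--         if frame < e < block:
--             block = e
--     return min(frame + steps, block - 1)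
-- ===== Notes on version B (the rewrite author's own statement) =====
-- stated objective: alternative
-- what changed: Replaces the frame-by-frame walk with repeated membership tests by a single min-scan over `existing` for the nearest blocking frame and a closed-form min; it trades early exit on the first blocked frame for a full one-pass scan of `existing`.
import Mathlib
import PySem

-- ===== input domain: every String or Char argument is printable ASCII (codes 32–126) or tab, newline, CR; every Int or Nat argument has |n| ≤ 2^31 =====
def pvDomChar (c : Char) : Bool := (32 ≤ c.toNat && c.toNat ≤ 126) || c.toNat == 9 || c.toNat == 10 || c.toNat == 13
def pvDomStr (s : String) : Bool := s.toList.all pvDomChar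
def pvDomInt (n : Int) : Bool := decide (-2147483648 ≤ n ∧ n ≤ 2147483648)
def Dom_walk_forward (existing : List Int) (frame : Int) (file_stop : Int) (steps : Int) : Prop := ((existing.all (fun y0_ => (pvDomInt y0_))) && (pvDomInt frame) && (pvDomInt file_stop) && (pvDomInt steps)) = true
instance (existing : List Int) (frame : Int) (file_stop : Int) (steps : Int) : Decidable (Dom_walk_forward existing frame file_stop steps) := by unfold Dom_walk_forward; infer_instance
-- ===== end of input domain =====

-- B replaces the frame-by-frame walk by one min-scan over `existing` plus a closed-form min (alternative algorithm, similar cost).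

-- ===== PORT A =====
-- the `for i in range(steps)` loop, recursing on the remaining iteration count
def walk_forward_loop (existing : List Int) (file_stop : Int) : Nat → Int → Int
  | 0, frame => frame
  | n + 1, frame =>
    let frame := frame + 1
    if frame ≥ file_stop ∨ frame ∈ existing then frame - 1
    else walk_forward_loop existing file_stop n frame

def walk_forward (existing : List Int) (frame : Int) (file_stop : Int) (steps : Int) : Int :=
  walk_forward_loop existing file_stop steps.toNat frame

-- ===== PORT B =====
def walk_forward_alt (existing : List Int) (frame : Int) (file_stop : Int) (steps : Int) : Int :=
  let block := existing.foldl (fun b e => if frame < e ∧ e < b then e else b) file_stop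
  min (frame + steps) (block - 1)

-- ===== PRECONDITION & SPEC =====
-- exactly A's asserts: 0 ≤ frame < file_stop, frame ∉ existing, steps ≥ 1 (A raises AssertionError otherwise)
def Pre_walk_forward (existing : List Int) (frame : Int) (file_stop : Int) (steps : Int) : Prop :=
  0 ≤ frame ∧ frame < file_stop ∧ frame ∉ existing ∧ 1 ≤ steps
instance (existing : List Int) (frame : Int) (file_stop : Int) (steps : Int) : Decidable (Pre_walk_forward existing frame file_stop steps) := by unfold Pre_walk_forward; infer_instance
def pvWitness_walk_forward : List Int × Int × Int × Int := ([3], 0, 5, 2)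

def Spec_walk_forward (existing : List Int) (frame : Int) (file_stop : Int) (steps : Int) (out : Int) : Prop := out = walk_forward_alt existing frame file_stop steps
instance (existing : List Int) (frame : Int) (file_stop : Int) (steps : Int) (out : Int) : Decidable (Spec_walk_forward existing frame file_stop steps out) := by unfold Spec_walk_forward; infer_instance

-- ===== CLAIM (what is proved, stated in full; the proofs are below) =====
def Claim_equal_walk_forward : Prop := ∀ (existing : List Int) (frame : Int) (file_stop : Int) (steps : Int), Dom_walk_forward existing frame file_stop steps → Pre_walk_forward existing frame file_stop steps → Spec_walk_forward existing frame file_stop steps (walk_forward existing frame file_stop steps)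

-- ===== LEMMAS AND PROOFS =====

-- the min-scan fold: its result is the old bound or a list element, ≤ the bound, > frame if the bound is, and a lower bound for the list's elements above frame
theorem fold_props (frame : Int) (l : List Int) (b : Int) :
    (l.foldl (fun b e => if frame < e ∧ e < b then e else b) b = b ∨
       l.foldl (fun b e => if frame < e ∧ e < b then e else b) b ∈ l) ∧
    l.foldl (fun b e => if frame < e ∧ e < b then e else b) b ≤ b ∧
    (frame < b → frame < l.foldl (fun b e => if frame < e ∧ e < b then e else b) b) ∧
    (∀ e ∈ l, e ≤ frame ∨ l.foldl (fun b e => if frame < e ∧ e < b then e else b) b ≤ e) := by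
  induction l generalizing b with
  | nil => simp
  | cons x l ih =>
    simp only [List.foldl_cons]
    by_cases h : frame < x ∧ x < b
    · simp only [if_pos h]
      obtain ⟨hmem, hle, hlt, hlb⟩ := ih x
      refine ⟨?_, ?_, fun _ => hlt h.1, ?_⟩
      · rcases hmem with h' | h'
        · exact Or.inr (by simp [h'])
        · exact Or.inr (List.mem_cons_of_mem _ h')
      · omega
      · intro e he
        rcases List.mem_cons.mp he with rfl | he'
        · exact Or.inr hle
        · exact hlb e he'
    · simp only [if_neg h]
      obtain ⟨hmem, hle, hlt, hlb⟩ := ih b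
      refine ⟨?_, hle, hlt, ?_⟩
      · rcases hmem with h' | h'
        · exact Or.inl h'
        · exact Or.inr (List.mem_cons_of_mem _ h')
      · intro e he
        rcases List.mem_cons.mp he with rfl | he'
        · by_cases he2 : e ≤ frame
          · exact Or.inl he2
          · exact Or.inr (by omega)
        · exact hlb e he'

-- loop characterisation: with `block` the nearest blocking value above frame, the walk returns min (frame+n) (block-1)
theorem loop_eq (existing : List Int) (file_stop block : Int)
    (hmem : block = file_stop ∨ block ∈ existing) (hle : block ≤ file_stop)
    (hlb : ∀ e ∈ existing, e ≤ frame ∨ block ≤ e) :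
    ∀ (n : Nat) (frame : Int), frame < block →
      (∀ e ∈ existing, e ≤ frame ∨ block ≤ e) →
      walk_forward_loop existing file_stop n frame = min (frame + n) (block - 1) := by
  intro n
  induction n with
  | zero => intro frame hfb _; simp [walk_forward_loop]; omega
  | succ n ih =>
    intro frame hfb hlb'
    simp only [walk_forward_loop]
    by_cases h : frame + 1 ≥ file_stop ∨ frame + 1 ∈ existing
    · rw [if_pos h]
      have hb1 : block = frame + 1 := by
        rcases h with h | h
        · omega
        · rcases hlb' (frame + 1) h with h' | h' <;> omega
      omega
    · rw [if_neg h]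
      rw [not_or] at h
      have hfb' : frame + 1 < block := by
        rcases hmem with rfl | hm
        · omega
        · rcases hlb' block hm with h' | h'
          · omega
          · rcases lt_or_eq_of_le (by omega : frame + 1 ≤ block) with h2 | h2
            · exact h2
            · exact absurd (h2 ▸ hm) h.2
      have := ih (frame + 1) hfb' (by
        intro e he
        rcases hlb' e he with h' | h'
        · by_cases h2 : e ≤ frame + 1
          · exact Or.inl h2
          · exact absurd (by omega : frame < e ∧ e < block) (by
              rintro ⟨h3, h4⟩
              rcases hlb e he with h5 | h5 <;> omega)
        · exact Or.inr h')
      rw [this]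
      omega

-- ===== VERDICT (by name: the statement is the Claim_ definition above) =====
theorem walk_forward_spec : Claim_equal_walk_forward := by
  intro existing frame file_stop steps _ hpre
  obtain ⟨h0, hfs, hnm, hst⟩ := hpre
  obtain ⟨hmem, hle, hlt, hlb⟩ := fold_props frame existing file_stop
  have hB : walk_forward_alt existing frame file_stop steps =
      min (frame + steps)
        (existing.foldl (fun b e => if frame < e ∧ e < b then e else b) file_stop - 1) := rfl
  show walk_forward existing frame file_stop steps = walk_forward_alt existing frame file_stop steps
  rw [hB]
  unfold walk_forward
  rw [loop_eq existing file_stop _ hmem hle hlb steps.toNat frame (hlt hfs) hlb]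
  have : ((steps.toNat : Int)) = steps := Int.toNat_of_nonneg (by omega)
  omega
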